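-- pv_equiv track=rewrite | github.com/kh277/BOJ | 백준/Platinum/12515. 챔피언소트 （Small）/챔피언소트 （Small）.py | solve
-- ===== SOURCE A (Python) =====
-- from collections import deque
--
-- def BFS(start, graph, visited):
--     q = deque()
--     q.append(start)
--     visited[start] = True
--     count = 1
--
--     while q:
--         curV = q.popleft()
--
--         for nextV in graph[curV]:
--             if visited[nextV] == False:
--                 q.append(nextV)
--                 visited[nextV] = True
--                 count += 1
--
--     if count == 1:
--         return 0
--     return count
--
-- def solve(N, A):
--     graph = [[] for _ in range(N+1)]
--     for i in range(1, N+1):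
--         graph[i].append(A[i-1])
--
--     visited = [False for _ in range(N+1)]
--     result = 0
--     for i in range(N):
--         if visited[i] == False:
--             result += BFS(i, graph, visited)
--
--     return result
-- ===== SOURCE B (Python) =====
-- def solve(N, A):
--     graph = [[] for _ in range(N+1)]
--     for i in range(1, N+1):
--         graph[i].append(A[i-1])
--
--     visited = [False]*(N+1)
--     result = 0
--     for i in range(N):
--         if not visited[i]:
--             visited[i] = True
--             count = 1
--             cur = i
--             while graph[cur]:
--                 nxt = graph[cur][0]
--                 if visited[nxt]:
--                     break
--                 visited[nxt] = True
--                 count += 1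
--                 cur = nxt
--             if count > 1:
--                 result += count
--     return result
-- ===== Notes on version B (the rewrite author's own statement) =====
-- stated objective: simpler
-- what changed: The queue-based BFS (deque, popleft, inner for-loop over successors) is replaced by a direct successor-chain walk with a single `cur` pointer, exploiting that every node has out-degree at most 1; the graph-building loop is kept verbatim.
import Mathlib
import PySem

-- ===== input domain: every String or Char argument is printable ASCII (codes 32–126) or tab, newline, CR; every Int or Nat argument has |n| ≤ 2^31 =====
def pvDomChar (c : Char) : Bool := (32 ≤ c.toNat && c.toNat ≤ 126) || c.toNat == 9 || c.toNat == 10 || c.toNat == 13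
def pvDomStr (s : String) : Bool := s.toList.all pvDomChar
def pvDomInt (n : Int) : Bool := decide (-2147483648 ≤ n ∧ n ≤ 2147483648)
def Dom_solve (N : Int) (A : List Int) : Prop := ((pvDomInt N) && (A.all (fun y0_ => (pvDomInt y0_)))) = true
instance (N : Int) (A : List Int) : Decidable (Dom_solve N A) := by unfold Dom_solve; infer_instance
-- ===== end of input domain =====

-- B replaces the queue-based BFS by a single-successor chain walk (out-degree ≤ 1): simpler, same values.

-- ===== PORT A =====
-- shared by both ports: both Pythons build `graph` with the identical loop
-- (graph = [[] for _ in range(N+1)]; for i in range(1, N+1): graph[i].append(A[i-1]))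
def buildGraph (N : Int) (A : List Int) : List (List Int) :=
  (PySem.List.pyRange 1 (N+1) 1).foldl
    (fun g i => PySem.List.pySetD g i (PySem.List.pyGetD g i [] ++ [PySem.List.pyGetD A (i-1) 0]))
    (List.replicate (N+1).toNat ([] : List Int))

-- the body of A's `for nextV in graph[curV]` loop, folded over the successor list
def bfsInner (succs : List Int) (q : List Int) (v : List Bool) (c : Int) :
    List Int × List Bool × Int :=
  succs.foldl
    (fun s nextV =>
      if PySem.List.pyGetD s.2.1 nextV false = false then
        (s.1 ++ [nextV], PySem.List.pySetD s.2.1 nextV true, s.2.2 + 1)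
      else s)
    (q, v, c)

-- A's `while q:` loop (fuel-bounded; fuel N+2 exceeds the ≤ N+1 possible pops on any input Pre_ admits)
def bfsLoop (g : List (List Int)) : Nat → List Int → List Bool → Int → Int × List Bool
  | 0, _, v, c => (c, v)
  | _ + 1, [], v, c => (c, v)
  | f + 1, curV :: rest, v, c =>
    let s := bfsInner (PySem.List.pyGetD g curV []) rest v c
    bfsLoop g f s.1 s.2.1 s.2.2

def BFS (start : Int) (g : List (List Int)) (v : List Bool) (fuel : Nat) : Int × List Bool :=
  let v1 := PySem.List.pySetD v start true
  let r := bfsLoop g fuel [start] v1 1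
  (if r.1 = 1 then 0 else r.1, r.2)

def solve (N : Int) (A : List Int) : Int :=
  let graph := buildGraph N A
  let visited := List.replicate (N+1).toNat false
  ((PySem.List.pyRange 0 N 1).foldl
    (fun s i =>
      if PySem.List.pyGetD s.2 i false = false then
        let r := BFS i graph s.2 ((N+2).toNat)
        (s.1 + r.1, r.2)
      else s)
    ((0 : Int), visited)).1

-- ===== PORT B =====
-- B's `while graph[cur]:` chain walk: follow the unique successor until it is absent or already visited
def chainLoop (g : List (List Int)) : Nat → Int → List Bool → Int → Int × List Bool
  | 0, _, v, c => (c, v)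
  | f + 1, cur, v, c =>
    match PySem.List.pyGetD g cur [] with
    | [] => (c, v)
    | nxt :: _ =>
      if PySem.List.pyGetD v nxt false then (c, v)
      else chainLoop g f nxt (PySem.List.pySetD v nxt true) (c + 1)

def solve_alt (N : Int) (A : List Int) : Int :=
  let graph := buildGraph N A
  ((PySem.List.pyRange 0 N 1).foldl
    (fun s i =>
      if PySem.List.pyGetD s.2 i false then s
      else
        let r := chainLoop graph ((N+2).toNat) i (PySem.List.pySetD s.2 i true) 1
        (if 1 < r.1 then s.1 + r.1 else s.1, r.2))
    ((0 : Int), List.replicate (N+1).toNat false)).1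

-- ===== PRECONDITION & SPEC =====
-- Pre_ excludes exactly the inputs where Python A (and B) raises IndexError: A shorter than N (raise
-- while building graph), or a successor value outside Python's index range [-(N+1), N] on a node whose
-- edge is examined — nodes 1..N-1 always are; node N's entry A[N-1] is examined iff node N is reached,
-- i.e. iff N or -1 occurs among the first N-1 values.
def Pre_solve (N : Int) (A : List Int) : Prop :=
  N ≤ (A.length : Int) ∧
  (∀ v ∈ A.take (N-1).toNat, -(N+1) ≤ v ∧ v ≤ N) ∧
  ((N ∈ A.take (N-1).toNat ∨ (-1 : Int) ∈ A.take (N-1).toNat) →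
    ∀ v ∈ A.take N.toNat, -(N+1) ≤ v ∧ v ≤ N)
instance (N : Int) (A : List Int) : Decidable (Pre_solve N A) := by unfold Pre_solve; infer_instance

def pvWitness_solve : Int × List Int := (3, [1, 2, 3])

def Spec_solve (N : Int) (A : List Int) (out : Int) : Prop := out = solve_alt N A
instance (N : Int) (A : List Int) (out : Int) : Decidable (Spec_solve N A out) := by unfold Spec_solve; infer_instance

-- ===== CLAIM (what is proved, stated in full; the proofs are below) =====
def Claim_equal_solve : Prop := ∀ (N : Int) (A : List Int), Dom_solve N A → Pre_solve N A → Spec_solve N A (solve N A)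

-- ===== LEMMAS AND PROOFS =====

-- out-of-range pyGetD is the default, in-range is an element
lemma pyGetD_default_or_mem {α : Type} (xs : List α) (i : Int) (d : α) :
    PySem.List.pyGetD xs i d = d ∨ PySem.List.pyGetD xs i d ∈ xs := by
  by_cases h : PySem.Raise.InRange xs.length i
  · exact Or.inr (PySem.List.pyGetD_mem xs d h)
  · exact Or.inl (PySem.List.pyGetD_of_none xs i d ((PySem.List.pyGet?_eq_none_iff xs i).mpr h))

lemma pyGetD_pySetD_ne (g : List (List Int)) (i j : Int) (v : List Int)
    (hi : 0 ≤ i) (hj : 0 ≤ j) (hne : i ≠ j) :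
    PySem.List.pyGetD (PySem.List.pySetD g i v) j ([] : List Int) = PySem.List.pyGetD g j [] := by
  rw [PySem.List.pySetD_of_nonneg g v hi]
  rw [show j = ((j.toNat : Nat) : Int) by omega, PySem.List.pyGetD_natCast, PySem.List.pyGetD_natCast]
  have : i.toNat ≠ j.toNat := by omega
  simp [List.getD, List.getElem?_set_ne this]

-- invariant: folding appends over pairwise-distinct, still-empty, nonnegative indices
-- keeps every entry of the graph of length ≤ 1
lemma build_inv (l : List Int) : ∀ (g : List (List Int)),
    (∀ e ∈ g, e.length ≤ 1) →
    (∀ i ∈ l, 0 ≤ i ∧ PySem.List.pyGetD g i ([] : List Int) = []) →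
    l.Pairwise (· ≠ ·) →
    ∀ e ∈ l.foldl (fun g i => PySem.List.pySetD g i (PySem.List.pyGetD g i [] ++ [PySem.List.pyGetD A (i-1) 0])) g,
      e.length ≤ 1 := by
  induction l with
  | nil => intro g hg _ _ e he; exact hg e he
  | cons i t ih =>
    intro g hg hfresh hpw e he
    simp only [List.foldl_cons] at he
    rcases hpw with _ | ⟨hni, hpwt⟩
    have hi0 := (hfresh i (by simp)).1
    have hie := (hfresh i (by simp)).2
    refine ih _ ?_ ?_ hpwt e he
    · intro e' he'
      rw [hie, List.nil_append, PySem.List.pySetD_of_nonneg _ _ hi0] at he'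
      rcases List.mem_or_eq_of_mem_set he' with h | h
      · exact hg e' h
      · simp [h]
    · intro j hj
      refine ⟨(hfresh j (by simp [hj])).1, ?_⟩
      rw [pyGetD_pySetD_ne g i j _ hi0 (hfresh j (by simp [hj])).1 (hni j hj)]
      exact (hfresh j (by simp [hj])).2

-- every successor list of the built graph has at most one element
lemma buildGraph_short (N : Int) (A : List Int) :
    ∀ j : Int, (PySem.List.pyGetD (buildGraph N A) j ([] : List Int)).length ≤ 1 := by
  intro j
  have h : ∀ e ∈ buildGraph N A, e.length ≤ 1 := by
    refine build_inv (A := A) (PySem.List.pyRange 1 (N+1) 1) _ ?_ ?_ ?_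
    · intro e he; simp [List.eq_of_mem_replicate he]
    · intro i hi
      have hi1 := (PySem.List.mem_pyRange_one.mp hi).1
      constructor
      · omega
      · rcases pyGetD_default_or_mem (List.replicate (N+1).toNat ([] : List Int)) i [] with h | h
        · exact h
        · exact List.eq_of_mem_replicate h
    · exact PySem.List.nodup_pyRange_one 1 (N+1)
  rcases pyGetD_default_or_mem (buildGraph N A) j [] with hd | hm
  · simp [hd]
  · exact h _ hm

-- A's while-loop on the empty queue returns the current state, at any fuel
lemma bfsLoop_nil (g : List (List Int)) (f : Nat) (v : List Bool) (c : Int) :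
    bfsLoop g f [] v c = (c, v) := by
  cases f <;> rfl

-- with out-degree ≤ 1 the queue stays a singleton and A's BFS loop IS B's chain walk
lemma bfs_eq_chain (g : List (List Int))
    (hG : ∀ j : Int, (PySem.List.pyGetD g j ([] : List Int)).length ≤ 1) :
    ∀ (f : Nat) (cur : Int) (v : List Bool) (c : Int),
      bfsLoop g f [cur] v c = chainLoop g f cur v c := by
  intro f
  induction f with
  | zero => intro cur v c; rfl
  | succ f ih =>
    intro cur v c
    have h1 := hG cur
    rcases hsucc : PySem.List.pyGetD g cur ([] : List Int) with _ | ⟨a, l⟩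
    · simp only [bfsLoop, chainLoop, bfsInner, hsucc, List.foldl_nil]
      exact bfsLoop_nil g f v c
    · have hl : l = [] := by
        rw [hsucc] at h1; simp at h1; exact h1
      subst hl
      simp only [bfsLoop, chainLoop, bfsInner, hsucc, List.foldl_cons, List.foldl_nil]
      by_cases hv : PySem.List.pyGetD v a false = false
      · rw [if_pos hv, if_neg (by simp [hv])]
        simpa using ih a (PySem.List.pySetD v a true) (c + 1)
      · rw [if_neg hv, if_pos (by revert hv; cases PySem.List.pyGetD v a false <;> simp)]
        exact bfsLoop_nil g f v c

-- the chain count never drops below its starting value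
lemma chainLoop_ge (g : List (List Int)) :
    ∀ (f : Nat) (cur : Int) (v : List Bool) (c : Int), c ≤ (chainLoop g f cur v c).1 := by
  intro f
  induction f with
  | zero => intro cur v c; exact le_refl c
  | succ f ih =>
    intro cur v c
    simp only [chainLoop]
    rcases PySem.List.pyGetD g cur ([] : List Int) with _ | ⟨a, l⟩
    · exact le_refl c
    · by_cases hv : PySem.List.pyGetD v a false
      · simp [hv]
      · simp only [hv, if_false, Bool.false_eq_true]
        calc c ≤ c + 1 := by omega
          _ ≤ _ := ih a (PySem.List.pySetD v a true) (c + 1)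

-- the two per-node fold steps agree on any graph of out-degree ≤ 1
lemma step_eq (g : List (List Int)) (fuel : Nat)
    (hG : ∀ j : Int, (PySem.List.pyGetD g j ([] : List Int)).length ≤ 1)
    (s : Int × List Bool) (i : Int) :
    (if PySem.List.pyGetD s.2 i false = false then
        let r := BFS i g s.2 fuel
        (s.1 + r.1, r.2)
      else s)
    = (if PySem.List.pyGetD s.2 i false then s
      else
        let r := chainLoop g fuel i (PySem.List.pySetD s.2 i true) 1
        (if 1 < r.1 then s.1 + r.1 else s.1, r.2)) := by
  by_cases hv : PySem.List.pyGetD s.2 i false = false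
  · rw [if_pos hv, if_neg (by simp [hv])]
    simp only [BFS, bfs_eq_chain g hG]
    have hge := chainLoop_ge g fuel i (PySem.List.pySetD s.2 i true) 1
    rcases h : chainLoop g fuel i (PySem.List.pySetD s.2 i true) 1 with ⟨c, v⟩
    rw [h] at hge
    simp only at hge ⊢
    by_cases hc : c = 1
    · simp [hc]
    · rw [if_neg hc, if_pos (by omega)]
  · rw [if_neg hv, if_pos (by revert hv; cases PySem.List.pyGetD s.2 i false <;> simp)]

-- ===== VERDICT (by name: the statement is the Claim_ definition above) =====
theorem solve_spec : Claim_equal_solve := by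
  intro N A _ _
  unfold Spec_solve solve solve_alt
  exact congrArg Prod.fst (PySem.List.foldl_congr_mem (PySem.List.pyRange 0 N 1) _ _
    ((0 : Int), List.replicate (N+1).toNat false)
    (fun s i _ => step_eq (buildGraph N A) ((N+2).toNat) (buildGraph_short N A) s i))
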